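-- pv_equiv track=rewrite | github.com/wilmurillo-ai/Design-Assistant | .skills/openclaw-skills/skills/oaker-io/wewrite/scripts/build_openclaw.py | transform_frontmatter
-- ===== SOURCE A (Python) =====
-- STRIP_FRONTMATTER_KEYS = {"allowed-tools"}
--
-- def transform_frontmatter(frontmatter: str) -> str:
--     """Remove Claude Code-specific frontmatter keys."""
--     lines = frontmatter.split("\n")
--     result = []
--     skip_block = False
--     for line in lines:
--         # Check if this line starts a key we want to strip
--         stripped = line.lstrip()
--         if any(stripped.startswith(f"{key}:") for key in STRIP_FRONTMATTER_KEYS):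
--             skip_block = True
--             continue
--         # If we're in a skip block, skip indented continuation lines (list items)
--         if skip_block:
--             if stripped.startswith("- ") or stripped == "":
--                 continue
--             skip_block = False
--         result.append(line)
--     return "\n".join(result)
-- ===== SOURCE B (Python) =====
-- STRIP_FRONTMATTER_KEYS = {"allowed-tools"}
--
-- def transform_frontmatter(frontmatter: str) -> str:
--     """Remove Claude Code-specific frontmatter keys."""
--     # Stage 1: group the lines into blocks: a continuation line ('- ' item or
--     # blank) attaches to the previous block, any other line opens a new block.
--     blocks = []
--     for line in frontmatter.split("\n"):
--         s = line.lstrip()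
--         if blocks and (s.startswith("- ") or s == ""):
--             blocks[-1].append(line)
--         else:
--             blocks.append([line])
--     # Stage 2: drop every block whose head line is a stripped key; flatten.
--     kept = [b for b in blocks
--             if not any(b[0].lstrip().startswith(key + ":")
--                        for key in STRIP_FRONTMATTER_KEYS)]
--     return "\n".join(line for b in kept for line in b)
-- ===== Notes on version B (the rewrite author's own statement) =====
-- stated objective: alternative
-- what changed: Replaces the single-pass skip_block flag state machine by a staged pipeline: first group the lines into blocks (a continuation line attaches to the previous block), then declaratively filter out blocks whose head is a stripped key, then flatten and join.
import Mathlib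
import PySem

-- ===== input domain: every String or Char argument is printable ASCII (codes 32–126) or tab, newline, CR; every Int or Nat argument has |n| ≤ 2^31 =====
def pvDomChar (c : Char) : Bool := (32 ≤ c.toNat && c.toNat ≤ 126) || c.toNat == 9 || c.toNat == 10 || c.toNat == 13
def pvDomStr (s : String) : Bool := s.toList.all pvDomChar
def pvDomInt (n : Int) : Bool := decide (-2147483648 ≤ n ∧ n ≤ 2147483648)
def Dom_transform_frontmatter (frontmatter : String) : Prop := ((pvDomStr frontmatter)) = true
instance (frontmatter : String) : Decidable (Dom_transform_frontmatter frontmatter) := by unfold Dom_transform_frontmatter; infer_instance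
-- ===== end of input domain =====

-- B replaces A's single-pass skip_block flag state machine by a staged pipeline:
-- group the lines into blocks, filter out blocks headed by a stripped key, flatten.
-- Alternative decomposition, same O(n) cost.

-- ===== PORT A =====
-- the loop body of A: state = (result, skip_block)
def pvStepA (st : List String × Bool) (line : String) : List String × Bool :=
  let stripped := PySem.Str.lstrip line
  if PySem.Str.startswith stripped "allowed-tools:" then (st.1, true)
  else if st.2 then
    (if PySem.Str.startswith stripped "- " || stripped == "" then (st.1, true)
     else (st.1 ++ [line], false))
  else (st.1 ++ [line], false)

def transform_frontmatter (frontmatter : String) : String :=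
  let lines := (PySem.Str.split? frontmatter "\n").getD []  -- sep "\n" ≠ "": never none
  PySem.Str.join "\n" (lines.foldl pvStepA ([], false)).1

-- ===== PORT B =====
-- does this line continue the previous block ('- ' item or blank)?
def pvCont (line : String) : Bool :=
  let s := PySem.Str.lstrip line
  PySem.Str.startswith s "- " || s == ""

-- does this line start a stripped key? (the sole member of STRIP_FRONTMATTER_KEYS)
def pvKey (line : String) : Bool :=
  PySem.Str.startswith (PySem.Str.lstrip line) "allowed-tools:"

-- Python's blocks[-1].append(line): append a line to the last block
def pvAppendLast : List (List String) → String → List (List String)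
  | [], l => [[l]]      -- unreachable: guarded by 'blocks and …'
  | [b], l => [b ++ [l]]
  | b :: bs, l => b :: pvAppendLast bs l

-- Stage-1 loop body of B: grouping the lines into blocks
def pvStepB (blocks : List (List String)) (line : String) : List (List String) :=
  if !blocks.isEmpty && pvCont line then pvAppendLast blocks line
  else blocks ++ [[line]]

-- block filter of Stage 2: keep blocks whose head is not a stripped key
def pvKeep (b : List String) : Bool := !pvKey (b.headD "")

def transform_frontmatter_alt (frontmatter : String) : String :=
  let lines := (PySem.Str.split? frontmatter "\n").getD []
  let blocks := lines.foldl pvStepB []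
  PySem.Str.join "\n" ((blocks.filter pvKeep).flatten)

-- ===== PRECONDITION & SPEC =====
def Spec_transform_frontmatter (frontmatter : String) (out : String) : Prop := out = transform_frontmatter_alt frontmatter
instance (frontmatter : String) (out : String) : Decidable (Spec_transform_frontmatter frontmatter out) := by unfold Spec_transform_frontmatter; infer_instance

-- ===== CLAIM (what is proved, stated in full; the proofs are below) =====
def Claim_equal_transform_frontmatter : Prop := ∀ (frontmatter : String), Dom_transform_frontmatter frontmatter → Spec_transform_frontmatter frontmatter (transform_frontmatter frontmatter)

-- ===== LEMMAS AND PROOFS =====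

-- a stripped-key header line is never a continuation line
theorem pvKey_not_cont (l : String) (h : pvKey l = true) : pvCont l = false := by
  unfold pvKey at h
  unfold pvCont
  set s := PySem.Str.lstrip l with hs
  rw [PySem.Str.startswith_eq, PySem.Chars.startswith_iff] at h
  obtain ⟨t, ht⟩ := h
  show (PySem.Str.startswith s "- " || s == "") = false
  have hlist : s.toList = 'a' :: "llowed-tools:".toList ++ t := by
    rw [← ht]; rfl
  have h1 : PySem.Str.startswith s "- " = false := by
    rw [PySem.Str.startswith_eq]
    by_contra hc
    rw [Bool.not_eq_false, PySem.Chars.startswith_iff] at hc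
    obtain ⟨u, hu⟩ := hc
    rw [hlist] at hu
    simp at hu
  have h2 : (s == "") = false := by
    rw [beq_eq_false_iff_ne]
    intro he
    rw [he] at hlist
    simp at hlist
  rw [h1, h2]
  rfl

-- key of the head of the last block (matches pvAppendLast's recursion)
def pvKeyLast : List (List String) → Bool
  | [] => false
  | [b] => pvKey (b.headD "")
  | _ :: bs => pvKeyLast bs

theorem pvKeyLast_append_single (bs : List (List String)) (b : List String) :
    pvKeyLast (bs ++ [b]) = pvKey (b.headD "") := by
  induction bs with
  | nil => rfl
  | cons x xs ih =>
      cases xs with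
      | nil => simp [pvKeyLast] at ih ⊢; try exact ih
      | cons y ys => simpa [pvKeyLast] using ih

theorem pvKeyLast_appendLast (bs : List (List String)) (l : String) (h : bs ≠ [])
    (hne : ∀ b ∈ bs, b ≠ []) :
    pvKeyLast (pvAppendLast bs l) = pvKeyLast bs := by
  induction bs with
  | nil => exact absurd rfl h
  | cons x xs ih =>
      cases xs with
      | nil =>
          have hx : x ≠ [] := hne x (by simp)
          cases x with
          | nil => exact absurd rfl hx
          | cons c cs => simp [pvAppendLast, pvKeyLast]
      | cons y ys =>
          have h2 := ih (by simp) (fun b hb => hne b (by simp [hb]))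
          cases ys with
          | nil => simpa [pvAppendLast, pvKeyLast] using h2
          | cons z zs => simpa [pvAppendLast, pvKeyLast] using h2

theorem pvFlatKeep_append_single (bs : List (List String)) (b : List String) :
    (((bs ++ [b]).filter pvKeep).flatten)
      = ((bs.filter pvKeep).flatten) ++ (if pvKeep b then b else []) := by
  by_cases h : pvKeep b = true
  · simp [List.filter_append, h]
  · rw [Bool.not_eq_true] at h
    simp [List.filter_append, h]

theorem pvFlatKeep_appendLast (bs : List (List String)) (l : String) (h : bs ≠ [])
    (hne : ∀ b ∈ bs, b ≠ []) :
    ((pvAppendLast bs l).filter pvKeep).flatten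
      = ((bs.filter pvKeep).flatten) ++ (if pvKeyLast bs then [] else [l]) := by
  induction bs with
  | nil => exact absurd rfl h
  | cons x xs ih =>
      cases xs with
      | nil =>
          have hx : x ≠ [] := hne x (by simp)
          cases x with
          | nil => exact absurd rfl hx
          | cons c cs =>
              by_cases hk : pvKey c = true
              · simp [pvAppendLast, pvKeyLast, pvKeep, List.filter, hk]
              · rw [Bool.not_eq_true] at hk
                simp [pvAppendLast, pvKeyLast, pvKeep, List.filter, hk]
      | cons y ys =>
          have hrec := ih (by simp) (fun b hb => hne b (by simp [hb]))
          by_cases hk : pvKeep x = true <;>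
            simp [pvAppendLast, List.filter_cons, hk, List.flatten_cons, pvKeyLast,
              hrec, List.append_assoc]

theorem pvAppendLast_nonempty (bs : List (List String)) (l : String)
    (hne : ∀ b ∈ bs, b ≠ []) : ∀ b ∈ pvAppendLast bs l, b ≠ [] := by
  induction bs with
  | nil => intro b hb; simp [pvAppendLast] at hb; simp [hb]
  | cons x xs ih =>
      cases xs with
      | nil =>
          intro b hb
          simp [pvAppendLast] at hb
          subst hb
          have hx := hne x (by simp)
          simp [hx]
      | cons y ys =>
          intro b hb
          simp only [pvAppendLast, List.mem_cons] at hb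
          rcases hb with hb | hb
          · rw [hb]; exact hne x (by simp)
          · exact ih (fun c hc => hne c (by simp [hc])) b hb

theorem pvStepB_nonempty (bs : List (List String)) (l : String)
    (hne : ∀ b ∈ bs, b ≠ []) : ∀ b ∈ pvStepB bs l, b ≠ [] := by
  unfold pvStepB
  split
  · exact pvAppendLast_nonempty bs l hne
  · intro b hb
    rw [List.mem_append] at hb
    rcases hb with hb | hb
    · exact hne b hb
    · simp at hb; simp [hb]

-- main invariant: A's fold state mirrors B's staged blocks
theorem pvMain : ∀ (ls : List String) (blocks : List (List String)),
    (∀ b ∈ blocks, b ≠ []) →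
    (List.foldl pvStepA (((blocks.filter pvKeep).flatten), pvKeyLast blocks) ls).1
      = (((List.foldl pvStepB blocks ls).filter pvKeep).flatten) := by
  intro ls
  induction ls with
  | nil => intro blocks _; rfl
  | cons l ls ih =>
      intro blocks hne
      rw [List.foldl_cons, List.foldl_cons]
      have hne' := pvStepB_nonempty blocks l hne
      by_cases hk : pvKey l = true
      · -- key line: A sets skip, B opens a block that stage 2 drops
        have hc := pvKey_not_cont l hk
        have hkC : PySem.Chars.startswith (PySem.Chars.lstrip l.toList)
            ['a','l','l','o','w','e','d','-','t','o','o','l','s',':'] = true := by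
          simpa [pvKey] using hk
        have hB : pvStepB blocks l = blocks ++ [[l]] := by
          simp [pvStepB, hc]
        have hA : pvStepA (((blocks.filter pvKeep).flatten), pvKeyLast blocks) l
            = (((blocks ++ [[l]]).filter pvKeep).flatten, pvKeyLast (blocks ++ [[l]])) := by
          have hkeep : pvKeep [l] = false := by simp [pvKeep, hk]
          simp only [pvStepA]
          rw [show PySem.Str.startswith (PySem.Str.lstrip l) "allowed-tools:" = true from hk]
          simp only [if_pos]
          rw [pvFlatKeep_append_single, hkeep, pvKeyLast_append_single]
          simp [hk]
        rw [hA, ← hB]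
        exact ih _ hne'
      · rw [Bool.not_eq_true] at hk
        have hk' : PySem.Str.startswith (PySem.Str.lstrip l) "allowed-tools:" = false := hk
        have hkC : PySem.Chars.startswith (PySem.Chars.lstrip l.toList)
            ['a','l','l','o','w','e','d','-','t','o','o','l','s',':'] = false := by
          simpa [pvKey] using hk
        by_cases hc : pvCont l = true
        · have hc' : (PySem.Str.startswith (PySem.Str.lstrip l) "- "
              || PySem.Str.lstrip l == "") = true := hc
          cases blocks with
          | nil =>
              -- leading continuation line: new block, kept
              have hB : pvStepB [] l = [[l]] := by simp [pvStepB]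
              have hA : pvStepA ((([] : List (List String)).filter pvKeep).flatten,
                  pvKeyLast []) l = ((([[l]]).filter pvKeep).flatten, pvKeyLast [[l]]) := by
                have hkeep : pvKeep [l] = true := by simp [pvKeep, hk]
                simp [pvStepA, pvKeyLast, List.filter, hkeep, hkC, hk]
              rw [hA, ← hB]
              exact ih _ hne'
          | cons x xs =>
              have hB : pvStepB (x :: xs) l = pvAppendLast (x :: xs) l := by
                simp [pvStepB, hc]
              have hKL := pvKeyLast_appendLast (x :: xs) l (by simp) hne
              have hFL := pvFlatKeep_appendLast (x :: xs) l (by simp) hne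
              have hA : pvStepA ((((x :: xs).filter pvKeep).flatten),
                  pvKeyLast (x :: xs)) l
                  = (((pvAppendLast (x :: xs) l).filter pvKeep).flatten,
                      pvKeyLast (pvAppendLast (x :: xs) l)) := by
                by_cases hs : pvKeyLast (x :: xs) = true
                · simp only [pvStepA, hk', Bool.false_eq_true, if_false, hs, if_true, hc']
                  rw [hFL, hs, hKL, hs]
                  simp
                · rw [Bool.not_eq_true] at hs
                  simp only [pvStepA, hk', Bool.false_eq_true, if_false, hs]
                  rw [hFL, hs, hKL, hs]
                  simp
              rw [hA, ← hB]
              exact ih _ hne'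
        · rw [Bool.not_eq_true] at hc
          have hc' : (PySem.Str.startswith (PySem.Str.lstrip l) "- "
              || PySem.Str.lstrip l == "") = false := hc
          have hB : pvStepB blocks l = blocks ++ [[l]] := by
            simp [pvStepB, hc]
          have hA : pvStepA (((blocks.filter pvKeep).flatten), pvKeyLast blocks) l
              = (((blocks ++ [[l]]).filter pvKeep).flatten,
                  pvKeyLast (blocks ++ [[l]])) := by
            have hkeep : pvKeep [l] = true := by simp [pvKeep, hk]
            simp only [pvStepA, hk', Bool.false_eq_true, if_false, hc']
            rw [pvFlatKeep_append_single, hkeep, pvKeyLast_append_single]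
            simp [hk]
          rw [hA, ← hB]
          exact ih _ hne'

-- ===== VERDICT (by name: the statement is the Claim_ definition above) =====
theorem transform_frontmatter_spec : Claim_equal_transform_frontmatter := by
  intro frontmatter _
  show PySem.Str.join "\n"
      (List.foldl pvStepA ([], false) ((PySem.Str.split? frontmatter "\n").getD [])).1
    = PySem.Str.join "\n"
      (((List.foldl pvStepB [] ((PySem.Str.split? frontmatter "\n").getD [])).filter
        pvKeep).flatten)
  rw [show (([], false) : List String × Bool)
      = ((([] : List (List String)).filter pvKeep).flatten, pvKeyLast []) from rfl,
    pvMain _ [] (by simp)]
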